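-- pv_equiv track=rewrite | github.com/thomasbuijtenweg/image-ranking-system | core/prompt_analyzer.py | extract_main_prompt
-- ===== SOURCE A (Python) =====
-- def extract_main_prompt(full_prompt: str) -> str:
--     """Extract the main/positive prompt from the full prompt text."""
--     if not full_prompt:
--         return ""
--
--     separators = [
--         'negative prompt:',
--         'negative:',
--         'neg:',
--         'steps:',
--         'cfg scale:',
--         'sampler:',
--         'seed:',
--         'model:',
--         'clip skip:',
--         'denoising strength:',
--         'parameters:',
--         '\nsteps:',
--         '\ncfg',
--         '\nsampler',
--         '\nseed',
--         '\nmodel'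
--     ]
--
--     lower_prompt = full_prompt.lower()
--     main_prompt = full_prompt
--
--     earliest_pos = len(full_prompt)
--     for separator in separators:
--         pos = lower_prompt.find(separator)
--         if pos != -1 and pos < earliest_pos:
--             earliest_pos = pos
--
--     if earliest_pos < len(full_prompt):
--         main_prompt = full_prompt[:earliest_pos]
--
--     return main_prompt.strip()
-- ===== SOURCE B (Python) =====
-- def extract_main_prompt(full_prompt: str) -> str:
--     """Extract the main/positive prompt from the full prompt text."""
--     separators = (
--         'negative prompt:', 'negative:', 'neg:', 'steps:', 'cfg scale:',
--         'sampler:', 'seed:', 'model:', 'clip skip:', 'denoising strength:',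
--         'parameters:', '\nsteps:', '\ncfg', '\nsampler', '\nseed', '\nmodel')
--     lower = full_prompt.lower()
--     for i in range(len(lower)):
--         if lower.startswith(separators, i):
--             return full_prompt[:i].strip()
--     return full_prompt.strip()
-- ===== Notes on version B (the rewrite author's own statement) =====
-- stated objective: idiomatic
-- what changed: B replaces the per-separator find-and-take-minimum loop by a single left-to-right scan of the lowercased prompt using str.startswith with the tuple of separators, cutting at the first position where any separator matches.
import Mathlib
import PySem

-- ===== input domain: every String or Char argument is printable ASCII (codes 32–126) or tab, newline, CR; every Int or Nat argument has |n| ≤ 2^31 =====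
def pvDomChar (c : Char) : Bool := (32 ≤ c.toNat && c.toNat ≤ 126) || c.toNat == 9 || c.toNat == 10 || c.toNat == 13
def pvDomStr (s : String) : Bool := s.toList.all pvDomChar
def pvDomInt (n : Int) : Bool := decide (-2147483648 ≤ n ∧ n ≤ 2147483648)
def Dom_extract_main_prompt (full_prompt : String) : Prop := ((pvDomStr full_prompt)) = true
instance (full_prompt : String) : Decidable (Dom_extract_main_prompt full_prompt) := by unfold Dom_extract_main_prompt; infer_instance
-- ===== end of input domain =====

-- B replaces A's per-separator find/min loop by one left-to-right scan that stops at the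
-- first position where any separator matches (same value, different traversal).

-- ===== PORT A =====
-- the separator list of A, in A's order
def pvSeps : List String :=
  ["negative prompt:", "negative:", "neg:", "steps:", "cfg scale:",
   "sampler:", "seed:", "model:", "clip skip:", "denoising strength:",
   "parameters:", "\nsteps:", "\ncfg", "\nsampler", "\nseed", "\nmodel"]

def extract_main_prompt (full_prompt : String) : String :=
  if full_prompt = "" then ""
  else
    let lower := PySem.Str.lower full_prompt
    let n : Int := (PySem.Str.len full_prompt : Int)
    let earliest : Int := pvSeps.foldl
      (fun e sep =>
        let pos := PySem.Str.find lower sep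
        if pos ≠ -1 ∧ pos < e then pos else e) n
    let main := if earliest < n then PySem.Str.slice full_prompt none (some earliest) else full_prompt
    PySem.Str.strip main

-- ===== PORT B =====
-- B's separator tuple, as lists of code points
def pvSepsB : List (List Char) :=
  ["negative prompt:", "negative:", "neg:", "steps:", "cfg scale:",
   "sampler:", "seed:", "model:", "clip skip:", "denoising strength:",
   "parameters:", "\nsteps:", "\ncfg", "\nsampler", "\nseed", "\nmodel"].map String.toList

-- lower.startswith(separators, i) : does any separator match at the head of this suffix?
def pvMatchAt (s : List Char) : Bool := pvSepsB.any (fun sep => sep.isPrefixOf s)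

-- B's loop `for i in range(len(lower))`: scan the suffixes of the lowered text left to right
def pvScanB : List Char → Nat → Option Nat
  | [], _ => none
  | c :: t, i => if pvMatchAt (c :: t) then some i else pvScanB t (i + 1)

def extract_main_prompt_alt (full_prompt : String) : String :=
  let lower := PySem.Str.lower full_prompt
  match pvScanB lower.toList 0 with
  | some i => PySem.Str.strip (PySem.Str.slice full_prompt none (some (i : Int)))
  | none => PySem.Str.strip full_prompt

-- ===== PRECONDITION & SPEC =====
def Spec_extract_main_prompt (full_prompt : String) (out : String) : Prop := out = extract_main_prompt_alt full_prompt
instance (full_prompt : String) (out : String) : Decidable (Spec_extract_main_prompt full_prompt out) := by unfold Spec_extract_main_prompt; infer_instance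

-- ===== CLAIM (what is proved, stated in full; the proofs are below) =====
def Claim_equal_extract_main_prompt : Prop := ∀ (full_prompt : String), Dom_extract_main_prompt full_prompt → Spec_extract_main_prompt full_prompt (extract_main_prompt full_prompt)

-- ===== LEMMAS AND PROOFS =====

theorem pvSeps_ne_nil : ∀ sep ∈ pvSeps, sep.toList ≠ [] := by decide

theorem pvSepsB_eq : pvSepsB = pvSeps.map String.toList := rfl

theorem pvMatchAt_iff (s : List Char) :
    pvMatchAt s = true ↔ ∃ sep ∈ pvSeps, sep.toList <+: s := by
  simp [pvMatchAt, pvSepsB_eq, List.any_eq_true, List.isPrefixOf_iff_prefix]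

theorem pvScanB_none (s : List Char) : ∀ i, pvScanB s i = none →
    ∀ k, k < s.length → pvMatchAt (s.drop k) = false := by
  induction s with
  | nil => intro i _ k hk; simp at hk
  | cons c t ih =>
    intro i h k hk
    have h' : (if pvMatchAt (c :: t) then some i else pvScanB t (i + 1)) = none := h
    by_cases hm : pvMatchAt (c :: t) = true
    · rw [if_pos hm] at h'; exact absurd h' (by simp)
    · rw [if_neg hm] at h'
      match k with
      | 0 => simpa using (Bool.eq_false_iff.mpr hm)
      | k + 1 => exact ih (i + 1) h' k (by simpa using hk)

theorem pvScanB_some (s : List Char) : ∀ i k, pvScanB s i = some k →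
    ∃ j, k = i + j ∧ j < s.length ∧ pvMatchAt (s.drop j) = true ∧
      ∀ m, m < j → pvMatchAt (s.drop m) = false := by
  induction s with
  | nil => intro i k h; exact absurd h (by simp [pvScanB])
  | cons c t ih =>
    intro i k h
    have h' : (if pvMatchAt (c :: t) then some i else pvScanB t (i + 1)) = some k := h
    by_cases hm : pvMatchAt (c :: t) = true
    · rw [if_pos hm] at h'
      refine ⟨0, by simpa using (Option.some.inj h').symm, by simp, by simpa using hm, ?_⟩
      intro m hm'; omega
    · rw [if_neg hm] at h'
      obtain ⟨j, hk, hj, hmatch, hmin⟩ := ih (i + 1) k h'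
      refine ⟨j + 1, by omega, by simpa using hj, by simpa using hmatch, ?_⟩
      intro m hmj
      match m with
      | 0 => exact Bool.eq_false_iff.mpr hm
      | m + 1 => exact (by simpa using hmin m (by omega))

theorem pvFoldA_spec (lower : String) (l : List String) : ∀ e : Int,
    (l.foldl (fun e sep =>
        if PySem.Str.find lower sep ≠ -1 ∧ PySem.Str.find lower sep < e
        then PySem.Str.find lower sep else e) e) ≤ e ∧
    (∀ sep ∈ l, PySem.Str.find lower sep ≠ -1 →
      (l.foldl (fun e sep =>
        if PySem.Str.find lower sep ≠ -1 ∧ PySem.Str.find lower sep < e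
        then PySem.Str.find lower sep else e) e) ≤ PySem.Str.find lower sep) ∧
    ((l.foldl (fun e sep =>
        if PySem.Str.find lower sep ≠ -1 ∧ PySem.Str.find lower sep < e
        then PySem.Str.find lower sep else e) e) = e ∨
      ∃ sep ∈ l, PySem.Str.find lower sep ≠ -1 ∧
        (l.foldl (fun e sep =>
          if PySem.Str.find lower sep ≠ -1 ∧ PySem.Str.find lower sep < e
          then PySem.Str.find lower sep else e) e) = PySem.Str.find lower sep) := by
  induction l with
  | nil => intro e; exact ⟨le_refl _, by simp, Or.inl rfl⟩
  | cons sep l ih =>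
    intro e
    have hfold : ((sep :: l).foldl (fun e sep =>
        if PySem.Str.find lower sep ≠ -1 ∧ PySem.Str.find lower sep < e
        then PySem.Str.find lower sep else e) e)
      = (l.foldl (fun e sep =>
        if PySem.Str.find lower sep ≠ -1 ∧ PySem.Str.find lower sep < e
        then PySem.Str.find lower sep else e)
        (if PySem.Str.find lower sep ≠ -1 ∧ PySem.Str.find lower sep < e
          then PySem.Str.find lower sep else e)) := rfl
    obtain ⟨hle, hmin, hcases⟩ := ih (if PySem.Str.find lower sep ≠ -1 ∧ PySem.Str.find lower sep < e
          then PySem.Str.find lower sep else e)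
    rw [hfold]
    by_cases hc : PySem.Str.find lower sep ≠ -1 ∧ PySem.Str.find lower sep < e
    · rw [if_pos hc] at hle hmin hcases ⊢
      refine ⟨by omega, ?_, ?_⟩
      · intro s hs hfs
        rcases List.mem_cons.mp hs with rfl | hs'
        · exact hle
        · exact hmin s hs' hfs
      · rcases hcases with hcase | ⟨s, hs, hfs, heq⟩
        · exact Or.inr ⟨sep, by simp, hc.1, hcase⟩
        · exact Or.inr ⟨s, by simp [hs], hfs, heq⟩
    · rw [if_neg hc] at hle hmin hcases ⊢
      refine ⟨hle, ?_, ?_⟩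
      · intro s hs hfs
        rcases List.mem_cons.mp hs with rfl | hs'
        · have : ¬ PySem.Str.find lower s < e := fun hlt => hc ⟨hfs, hlt⟩
          omega
        · exact hmin s hs' hfs
      · rcases hcases with hcase | ⟨s, hs, hfs, heq⟩
        · exact Or.inl hcase
        · exact Or.inr ⟨s, by simp [hs], hfs, heq⟩

-- the two ports agree
theorem pv_agree (full_prompt : String) :
    extract_main_prompt full_prompt = extract_main_prompt_alt full_prompt := by
  by_cases hfp : full_prompt = ""
  · subst hfp; decide
  · set lower := PySem.Str.lower full_prompt with hlower
    set n : Int := (PySem.Str.len full_prompt : Int) with hn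
    obtain ⟨hle, hmin, hcases⟩ := pvFoldA_spec lower pvSeps n
    set r : Int := pvSeps.foldl
      (fun e sep =>
        if PySem.Str.find lower sep ≠ -1 ∧ PySem.Str.find lower sep < e
        then PySem.Str.find lower sep else e) n with hr
    have hA : extract_main_prompt full_prompt =
        PySem.Str.strip (if r < n then PySem.Str.slice full_prompt none (some r) else full_prompt) := by
      rw [extract_main_prompt, if_neg hfp]
    have hlen : lower.toList.length = full_prompt.length := by
      rw [hlower, PySem.Str.toList_lower]
      simp [PySem.Chars.lower]
    have hnval : n = (full_prompt.length : Int) := by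
      rw [hn]; simp
    have hfind : ∀ sep : String, PySem.Str.find lower sep = PySem.Chars.find lower.toList sep.toList :=
      fun sep => PySem.Str.find_eq lower sep
    rcases hscan : pvScanB lower.toList 0 with _ | k
    -- no separator occurs anywhere
    · have hnone : ∀ sep ∈ pvSeps, PySem.Str.find lower sep = -1 := by
        intro sep hs
        rw [hfind]
        rw [PySem.Chars.find_eq_neg_one_iff]
        intro hinf
        have : ∃ j, sep.toList <+: lower.toList.drop j :=
          (PySem.Chars.exists_prefix_drop_iff_isIn sep.toList lower.toList).mpr
            ((PySem.Chars.isIn_iff_infix sep.toList lower.toList).mpr hinf)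
        obtain ⟨j, hj⟩ := this
        by_cases hjl : j < lower.toList.length
        · have hfalse := pvScanB_none lower.toList 0 hscan j hjl
          have : pvMatchAt (lower.toList.drop j) = true :=
            (pvMatchAt_iff _).mpr ⟨sep, hs, hj⟩
          simp [hfalse] at this
        · have : lower.toList.drop j = [] := List.drop_eq_nil_of_le (by omega)
          rw [this] at hj
          exact pvSeps_ne_nil sep hs (List.prefix_nil.mp hj)
      have hrn : r = n := by
        rcases hcases with h | ⟨sep, hs, hfs, _⟩
        · exact h
        · exact absurd (hnone sep hs) hfs
      rw [hA, hrn, if_neg (lt_irrefl n)]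
      rw [extract_main_prompt_alt]
      simp only [← hlower, hscan]
    -- first match at position k
    · obtain ⟨j, hkj, hjlen, hmatch, hminscan⟩ := pvScanB_some lower.toList 0 k hscan
      have hkeq : k = j := by omega
      subst hkeq
      -- r ≤ k
      obtain ⟨sep, hs, hpre⟩ := (pvMatchAt_iff _).mp hmatch
      have hinf : sep.toList <:+: lower.toList :=
        (PySem.Chars.isIn_iff_infix sep.toList lower.toList).mp
          ((PySem.Chars.exists_prefix_drop_iff_isIn sep.toList lower.toList).mp ⟨k, hpre⟩)
      have hfpos : 0 ≤ PySem.Chars.find lower.toList sep.toList :=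
        (PySem.Chars.find_nonneg_iff _ _).mpr hinf
      have hspec := PySem.Chars.find_spec hfpos
      have hfk : (PySem.Chars.find lower.toList sep.toList).toNat ≤ k := by
        by_contra hlt
        exact absurd hpre (hspec.2 k (by omega))
      have hrk : r ≤ (k : Int) := by
        have := hmin sep hs (by rw [hfind]; omega)
        rw [hfind] at this
        omega
      -- k ≤ r
      have hkr : (k : Int) ≤ r := by
        rcases hcases with h | ⟨sep', hs', hfs', heq⟩
        · rw [h, hnval]; exact_mod_cast le_of_lt (by omega : k < full_prompt.length)
        · rw [hfind] at hfs' heq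
          have hfpos' : 0 ≤ PySem.Chars.find lower.toList sep'.toList := by
            have := PySem.Chars.neg_one_le_find lower.toList sep'.toList
            omega
          have hspec' := PySem.Chars.find_spec hfpos'
          have hmatch' : pvMatchAt (lower.toList.drop (PySem.Chars.find lower.toList sep'.toList).toNat) = true :=
            (pvMatchAt_iff _).mpr ⟨sep', hs', hspec'.1⟩
          have hge : k ≤ (PySem.Chars.find lower.toList sep'.toList).toNat := by
            by_contra hlt
            have hfalse := hminscan (PySem.Chars.find lower.toList sep'.toList).toNat (by omega)
            rw [hfalse] at hmatch'
            simp at hmatch'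
          omega
      have hrval : r = (k : Int) := le_antisymm hrk hkr
      have hkn : (k : Int) < n := by
        rw [hnval]; exact_mod_cast (by omega : k < full_prompt.length)
      rw [hA, hrval, if_pos hkn]
      rw [extract_main_prompt_alt]
      simp only [← hlower, hscan]

-- ===== VERDICT (by name: the statement is the Claim_ definition above) =====
theorem extract_main_prompt_spec : Claim_equal_extract_main_prompt := by
  intro full_prompt _
  exact pv_agree full_prompt
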